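-- pv_equiv track=rewrite | github.com/PetersGithubCode/multi-step-reasoning-experiments | A-1-b-HpQA/base_line_HpQA_2_3000_test.py | categorize_samples_by_hops
-- ===== SOURCE A (Python) =====
-- def categorize_samples_by_hops(f_list_of_samples):
--
--     # 1. Initialize four empty lists to store the categorized samples.
--     samples_with_1_hop = []
--     samples_with_2_hops = []
--     samples_with_3_hops = []
--     samples_with_4_hops = []
--
--     # 2. Loop through the main list of samples.
--     for sample in f_list_of_samples:
--         # Use .get() with a default empty list to safely handle
--         # cases where the 'contexts_from_hops' key might be missing.
--         contexts = sample.get('contexts_from_hops', [])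
--
--         # 3. Determine the number of hops by the length of the list.
--         num_hops = len(contexts)
--
--         # 4. Append the entire sample to the correct list based on its hop count.
--         if num_hops == 1:
--             samples_with_1_hop.append(sample)
--         elif num_hops == 2:
--             samples_with_2_hops.append(sample)
--         elif num_hops == 3:
--             samples_with_3_hops.append(sample)
--         elif num_hops == 4:
--             samples_with_4_hops.append(sample)
--         # Samples with 0 hops or more than 4 hops will be ignored.
--
--     # 5. Return the four populated lists.
--     return samples_with_1_hop, samples_with_2_hops, samples_with_3_hops, samples_with_4_hops
-- ===== SOURCE B (Python) =====
-- def categorize_samples_by_hops(f_list_of_samples):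
--     def hops(sample):
--         return len(sample.get('contexts_from_hops', []))
--     return ([s for s in f_list_of_samples if hops(s) == 1],
--             [s for s in f_list_of_samples if hops(s) == 2],
--             [s for s in f_list_of_samples if hops(s) == 3],
--             [s for s in f_list_of_samples if hops(s) == 4])
-- ===== Notes on version B (the rewrite author's own statement) =====
-- stated objective: idiomatic
-- what changed: Replaces the single loop with four mutable accumulator lists and an if/elif chain by four independent list-comprehension filters, one per hop count, returned directly as the tuple.
import Mathlib
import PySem

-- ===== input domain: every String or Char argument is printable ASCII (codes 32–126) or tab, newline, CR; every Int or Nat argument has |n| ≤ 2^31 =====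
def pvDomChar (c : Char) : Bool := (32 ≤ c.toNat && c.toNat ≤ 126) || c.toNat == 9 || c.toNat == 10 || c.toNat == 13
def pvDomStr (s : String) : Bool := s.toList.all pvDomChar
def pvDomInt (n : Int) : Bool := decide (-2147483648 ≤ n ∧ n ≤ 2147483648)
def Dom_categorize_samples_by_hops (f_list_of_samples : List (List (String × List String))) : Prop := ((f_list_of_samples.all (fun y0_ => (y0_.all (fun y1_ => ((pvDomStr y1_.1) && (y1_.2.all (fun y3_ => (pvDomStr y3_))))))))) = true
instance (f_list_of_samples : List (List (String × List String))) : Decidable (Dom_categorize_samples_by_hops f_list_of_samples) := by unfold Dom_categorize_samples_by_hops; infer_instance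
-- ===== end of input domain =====

-- B replaces A's single loop over four mutable accumulators with four independent
-- list-comprehension filters (idiomatic; same O(n) cost, no speed claim).

-- ===== PORT A =====
-- A: one pass, four accumulator lists, if/elif chain on len(sample.get('contexts_from_hops', [])).
def categorize_samples_by_hops (f_list_of_samples : List (List (String × List String))) : (List (List (String × List String))) × (List (List (String × List String))) × (List (List (String × List String))) × (List (List (String × List String))) :=
  f_list_of_samples.foldl
    (fun st sample =>
      let contexts := PySem.Dict.getD (PySem.Dict.mk sample) "contexts_from_hops" ([] : List String)
      let num_hops := contexts.length
      if num_hops = 1 then (st.1 ++ [sample], st.2.1, st.2.2.1, st.2.2.2)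
      else if num_hops = 2 then (st.1, st.2.1 ++ [sample], st.2.2.1, st.2.2.2)
      else if num_hops = 3 then (st.1, st.2.1, st.2.2.1 ++ [sample], st.2.2.2)
      else if num_hops = 4 then (st.1, st.2.1, st.2.2.1, st.2.2.2 ++ [sample])
      else st)
    ([], [], [], [])

-- ===== PORT B =====
-- B: helper hops, then four filters.
def pvHops (sample : List (String × List String)) : Nat :=
  (PySem.Dict.getD (PySem.Dict.mk sample) "contexts_from_hops" ([] : List String)).length

def categorize_samples_by_hops_alt (f_list_of_samples : List (List (String × List String))) : (List (List (String × List String))) × (List (List (String × List String))) × (List (List (String × List String))) × (List (List (String × List String))) :=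
  (f_list_of_samples.filter (fun s => pvHops s == 1),
   f_list_of_samples.filter (fun s => pvHops s == 2),
   f_list_of_samples.filter (fun s => pvHops s == 3),
   f_list_of_samples.filter (fun s => pvHops s == 4))

-- ===== PRECONDITION & SPEC =====
def Spec_categorize_samples_by_hops (f_list_of_samples : List (List (String × List String))) (out : (List (List (String × List String))) × (List (List (String × List String))) × (List (List (String × List String))) × (List (List (String × List String)))) : Prop := out = categorize_samples_by_hops_alt f_list_of_samples
instance (f_list_of_samples : List (List (String × List String))) (out : (List (List (String × List String))) × (List (List (String × List String))) × (List (List (String × List String))) × (List (List (String × List String)))) : Decidable (Spec_categorize_samples_by_hops f_list_of_samples out) := by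
  unfold Spec_categorize_samples_by_hops
  letI d : DecidableEq (List (List (String × List String))) := inferInstance
  letI d2 : DecidableEq ((List (List (String × List String))) × (List (List (String × List String)))) := instDecidableEqProd
  letI d3 : DecidableEq ((List (List (String × List String))) × (List (List (String × List String))) × (List (List (String × List String)))) := instDecidableEqProd
  exact instDecidableEqProd out (categorize_samples_by_hops_alt f_list_of_samples)

-- ===== CLAIM (what is proved, stated in full; the proofs are below) =====
def Claim_equal_categorize_samples_by_hops : Prop := ∀ (f_list_of_samples : List (List (String × List String))), Dom_categorize_samples_by_hops f_list_of_samples → Spec_categorize_samples_by_hops f_list_of_samples (categorize_samples_by_hops f_list_of_samples)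

-- ===== LEMMAS AND PROOFS =====

-- Loop invariant: A's fold from any starting state appends exactly the four filters.
theorem pvFold_eq_filters (l : List (List (String × List String)))
    (st : (List (List (String × List String))) × (List (List (String × List String))) × (List (List (String × List String))) × (List (List (String × List String)))) :
    l.foldl
      (fun st sample =>
        let contexts := PySem.Dict.getD (PySem.Dict.mk sample) "contexts_from_hops" ([] : List String)
        let num_hops := contexts.length
        if num_hops = 1 then (st.1 ++ [sample], st.2.1, st.2.2.1, st.2.2.2)
        else if num_hops = 2 then (st.1, st.2.1 ++ [sample], st.2.2.1, st.2.2.2)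
        else if num_hops = 3 then (st.1, st.2.1, st.2.2.1 ++ [sample], st.2.2.2)
        else if num_hops = 4 then (st.1, st.2.1, st.2.2.1, st.2.2.2 ++ [sample])
        else st)
      st
    = (st.1 ++ l.filter (fun s => pvHops s == 1),
       st.2.1 ++ l.filter (fun s => pvHops s == 2),
       st.2.2.1 ++ l.filter (fun s => pvHops s == 3),
       st.2.2.2 ++ l.filter (fun s => pvHops s == 4)) := by
  induction l generalizing st with
  | nil => simp
  | cons x xs ih =>
    simp only [List.foldl_cons, List.filter_cons, pvHops]
    by_cases h1 : (PySem.Dict.getD (PySem.Dict.mk x) "contexts_from_hops" ([] : List String)).length = 1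
    · simp [pvHops, h1, ih]
    · by_cases h2 : (PySem.Dict.getD (PySem.Dict.mk x) "contexts_from_hops" ([] : List String)).length = 2
      · simp [pvHops, h2, ih]
      · by_cases h3 : (PySem.Dict.getD (PySem.Dict.mk x) "contexts_from_hops" ([] : List String)).length = 3
        · simp [pvHops, h3, ih]
        · by_cases h4 : (PySem.Dict.getD (PySem.Dict.mk x) "contexts_from_hops" ([] : List String)).length = 4
          · simp [pvHops, h4, ih]
          · simp [pvHops, h1, h2, h3, h4, ih]

-- ===== VERDICT (by name: the statement is the Claim_ definition above) =====
theorem categorize_samples_by_hops_spec : Claim_equal_categorize_samples_by_hops := by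
  intro l _
  unfold Spec_categorize_samples_by_hops categorize_samples_by_hops categorize_samples_by_hops_alt
  simpa using pvFold_eq_filters l ([], [], [], [])
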